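-- pv_equiv track=rewrite | github.com/paalso/mipt_python_course | 8_testing/2/C.py | find_slippers
-- ===== SOURCE A (Python) =====
-- def find_slippers(L):
--
--     len_ = len(L)
--
--     def find_next(i):
--         for j in range(i + 1, len_):
--             if L[j] == - L[i]:
--                 return j - i
--
--     min_dist = len_
--     for i, e in enumerate(L):
--         if e < 0:
--             to_next_dist = find_next(i)
--             if to_next_dist:
--                 min_dist = min(to_next_dist, min_dist)
--
--     if min_dist < len_:
--         return min_dist
--     return 0
-- ===== SOURCE B (Python) =====
-- def find_slippers(L):
--     # One backward pass: 'nearest' maps each positive value to the nearest index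
--     # to the right holding it; each negative's next match is one dict lookup.
--     if min(L, default=0) >= 0:
--         return 0  # no negative value at all => no pair => 0
--     n = len(L)
--     nearest = {}
--     get = nearest.get
--     best = n
--     for i, x in zip(range(n - 1, -1, -1), reversed(L)):
--         if x < 0:
--             j = get(-x)
--             if j is not None and j - i < best:
--                 best = j - i
--         elif x > 0:
--             nearest[x] = i
--     return best if best < n else 0
-- ===== Notes on version B (the rewrite author's own statement) =====
-- stated objective: faster
-- what changed: Replaced the per-negative forward rescan (nested loops) by a C-speed min() early-out for lists without negatives plus a single backward pass maintaining a dict from each positive value to its nearest index on the right, so each negative's next match is one dict lookup.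
import Mathlib
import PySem

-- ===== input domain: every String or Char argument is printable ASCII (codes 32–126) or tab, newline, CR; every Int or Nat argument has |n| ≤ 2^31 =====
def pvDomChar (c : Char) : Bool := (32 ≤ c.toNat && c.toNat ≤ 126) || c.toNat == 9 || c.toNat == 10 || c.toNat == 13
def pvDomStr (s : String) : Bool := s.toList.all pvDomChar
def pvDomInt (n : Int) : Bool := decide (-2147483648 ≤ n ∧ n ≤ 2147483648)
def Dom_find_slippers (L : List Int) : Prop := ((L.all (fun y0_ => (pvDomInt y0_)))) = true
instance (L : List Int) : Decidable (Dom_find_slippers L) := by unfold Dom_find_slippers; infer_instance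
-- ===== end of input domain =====

-- B replaces A's per-negative forward rescan by a min()-based early-out for lists
-- without negatives and otherwise a single backward pass with a dict of the nearest
-- positive index per value (objective: faster, measured).

-- ===== PORT A =====
-- find_next's inner 'for j in range(i + 1, len_)' loop; indices i, j that are
-- read are always nonnegative and in range here, so '.getD 0' is exact.
def pvFindNextGo (L : List Int) (i : Int) (j : Nat) : Option Int :=
  if h : j < L.length then
    if (PySem.List.pyGet? L (j : Int)).getD 0 = -((PySem.List.pyGet? L i).getD 0) then
      some ((j : Int) - i)
    else pvFindNextGo L i (j + 1)
  else none
termination_by L.length - j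

-- def find_next(i): scan j = i+1 .. len_-1 (i is a nonnegative enumerate index)
def pvFindNext (L : List Int) (i : Int) : Option Int :=
  pvFindNextGo L i (i + 1).toNat

def find_slippers (L : List Int) : Int :=
  let len_ : Int := PySem.List.len L
  let min_dist :=
    (PySem.List.enumerate L).foldl
      (fun min_dist (p : Int × Int) =>
        if p.2 < 0 then
          match pvFindNext L p.1 with
          | some to_next_dist =>
              -- 'if to_next_dist:' — falsy iff the int is 0 (None handled by the match)
              if to_next_dist ≠ 0 then min to_next_dist min_dist else min_dist
          | none => min_dist
        else min_dist)
      len_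
  if min_dist < len_ then min_dist else 0

-- ===== PORT B =====
-- 'for i in range(n - 1, -1, -1)': pvAltGo L (k+1) d best processes index k
-- then continues with k-1, ..., 0.  Index k < n, so '.getD 0' is exact.
def pvAltGo (L : List Int) : Nat → PySem.Dict Int Int → Int → Int
  | 0, _, best => best
  | k + 1, nearest, best =>
    -- 'for i, x in zip(range(n-1,-1,-1), reversed(L))' pairs i = k with x = L[k]
    let x := L.getD k 0
    if x < 0 then
      match nearest.get? (-x) with
      | some j =>
          if j - (k : Int) < best then pvAltGo L k nearest (j - (k : Int))
          else pvAltGo L k nearest best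
      | none => pvAltGo L k nearest best
    else if 0 < x then
      pvAltGo L k (nearest.insert x (k : Int)) best
    else pvAltGo L k nearest best

def find_slippers_alt (L : List Int) : Int :=
  -- 'if min(L, default=0) >= 0: return 0' — no negative value, no pair
  if 0 ≤ PySem.List.minD L (fun x => x) 0 then 0
  else
    let n : Int := PySem.List.len L
    let best := pvAltGo L L.length PySem.Dict.empty n
    if best < n then best else 0

-- ===== PRECONDITION & SPEC =====
def Spec_find_slippers (L : List Int) (out : Int) : Prop := out = find_slippers_alt L
instance (L : List Int) (out : Int) : Decidable (Spec_find_slippers L out) := by unfold Spec_find_slippers; infer_instance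

-- ===== CLAIM (what is proved, stated in full; the proofs are below) =====
def Claim_equal_find_slippers : Prop := ∀ (L : List Int), Dom_find_slippers L → Spec_find_slippers L (find_slippers L)

-- ===== LEMMAS AND PROOFS =====

-- index of the first occurrence of v in L at position ≥ k (the common reference)
def pvFirstFrom (L : List Int) (k : Nat) (v : Int) : Option Nat :=
  ((L.drop k).findIdx? (· == v)).map (· + k)

-- the contribution of index i: distance to the next matching positive, if i is negative
def pvOptDist (L : List Int) (i : Nat) : Option Int :=
  if L.getD i 0 < 0 then
    (pvFirstFrom L (i + 1) (-(L.getD i 0))).map (fun (j : Nat) => (j : Int) - (i : Int))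
  else none

def pvStep (L : List Int) (md : Int) (i : Nat) : Int :=
  match pvOptDist L i with
  | some d => min d md
  | none => md

theorem pvFirstFrom_end (L : List Int) (k : Nat) (v : Int) (h : L.length ≤ k) :
    pvFirstFrom L k v = none := by
  simp [pvFirstFrom, List.drop_eq_nil_of_le h]

theorem pvFirstFrom_step (L : List Int) (k : Nat) (v : Int) (h : k < L.length) :
    pvFirstFrom L k v = if L[k] = v then some k else pvFirstFrom L (k + 1) v := by
  unfold pvFirstFrom
  rw [List.drop_eq_getElem_cons h, List.findIdx?_cons]
  by_cases hv : L[k] = v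
  · simp [hv]
  · simp only [hv]
    simp [Option.map_map, Function.comp_def, Nat.add_assoc, Nat.add_comm 1 k, beq_iff_eq, hv]

theorem pvFirstFrom_ge (L : List Int) (k : Nat) (v : Int) (j : Nat)
    (h : pvFirstFrom L k v = some j) : k ≤ j := by
  unfold pvFirstFrom at h
  rcases Option.map_eq_some_iff.mp h with ⟨j', _, rfl⟩
  omega

theorem pvFindNextGo_eq (L : List Int) (i : Int) (j : Nat) :
    pvFindNextGo L i j =
      (pvFirstFrom L j (-((PySem.List.pyGet? L i).getD 0))).map (fun (j' : Nat) => (j' : Int) - i) := by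
  unfold pvFindNextGo
  by_cases h : j < L.length
  · have hget : (PySem.List.pyGet? L (j : Int)).getD 0 = L[j] := by
      simp [PySem.List.pyGet?_natCast, List.getElem?_eq_getElem h]
    rw [dif_pos h, hget, pvFirstFrom_step L j _ h]
    by_cases hv : L[j] = -((PySem.List.pyGet? L i).getD 0)
    · rw [if_pos hv, if_pos hv]; rfl
    · rw [if_neg hv, if_neg hv]
      exact pvFindNextGo_eq L i (j + 1)
  · rw [dif_neg h, pvFirstFrom_end L j _ (by omega)]
    rfl
termination_by L.length - j

-- pvStep distributes over an accumulated 'min c ·'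
theorem pvFoldl_step_min (L : List Int) (l : List Nat) :
    ∀ (b c : Int), l.foldl (pvStep L) (min c b) = min c (l.foldl (pvStep L) b) := by
  induction l with
  | nil => intro b c; rfl
  | cons a l ih =>
    intro b c
    have : pvStep L (min c b) a = min c (pvStep L b a) := by
      unfold pvStep
      cases pvOptDist L a with
      | none => rfl
      | some d => simp [min_left_comm]
    simp only [List.foldl_cons, this, ih]

-- B's backward loop computes the forward fold of pvStep, given that 'nearest'
-- holds, for every positive value, the first index ≥ k carrying it.
theorem pvAltGo_eq (L : List Int) :
    ∀ (k : Nat) (d : PySem.Dict Int Int) (best : Int), k ≤ L.length →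
      (∀ v : Int, 0 < v → d.get? v = (pvFirstFrom L k v).map (fun (j : Nat) => (j : Int))) →
      pvAltGo L k d best = (List.range k).foldl (pvStep L) best := by
  intro k
  induction k with
  | zero => intro d best _ _; rfl
  | succ k ih =>
    intro d best hk hinv
    have hklt : k < L.length := by omega
    have hgetD : L.getD k 0 = L[k] := List.getD_eq_getElem L 0 hklt
    have hrange : (List.range (k + 1)).foldl (pvStep L) best
        = pvStep L ((List.range k).foldl (pvStep L) best) k := by
      rw [List.range_succ, List.foldl_append]; rfl
    unfold pvAltGo
    by_cases hneg : L.getD k 0 < 0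
    · rw [if_pos hneg]
      have hinv' : ∀ v : Int, 0 < v →
          d.get? v = (pvFirstFrom L k v).map (fun (j : Nat) => (j : Int)) := by
        intro v hv
        rw [hinv v hv, pvFirstFrom_step L k v hklt,
            if_neg (by rw [← hgetD]; omega)]
      have hlook := hinv (-(L.getD k 0)) (by omega)
      have hdist : pvOptDist L k
          = (pvFirstFrom L (k + 1) (-(L.getD k 0))).map
              (fun (j : Nat) => (j : Int) - (k : Int)) := by
        unfold pvOptDist; rw [if_pos hneg]
      cases hff : pvFirstFrom L (k + 1) (-(L.getD k 0)) with
      | none =>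
        rw [hlook, hff]
        simp only [Option.map_none]
        rw [ih d best (by omega) hinv', hrange]
        unfold pvStep
        rw [hdist, hff]
        rfl
      | some j' =>
        rw [hlook, hff]
        simp only [Option.map_some]
        have hmin : (if (j' : Int) - (k : Int) < best
              then pvAltGo L k d ((j' : Int) - (k : Int))
              else pvAltGo L k d best)
            = pvAltGo L k d (min best ((j' : Int) - (k : Int))) := by
          by_cases h : (j' : Int) - (k : Int) < best
          · rw [if_pos h, min_eq_right (le_of_lt h)]
          · rw [if_neg h, min_eq_left (by omega)]
        rw [hmin, ih d (min best ((j' : Int) - (k : Int))) (by omega) hinv', hrange]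
        unfold pvStep
        rw [hdist, hff]
        simp only [Option.map_some]
        rw [min_comm best ((j' : Int) - (k : Int))]
        exact pvFoldl_step_min L (List.range k) best ((j' : Int) - (k : Int))
    · rw [if_neg hneg]
      have hstep : pvOptDist L k = none := by
        unfold pvOptDist; rw [if_neg hneg]
      by_cases hpos : 0 < L.getD k 0
      · rw [if_pos hpos]
        have hinv2 : ∀ v : Int, 0 < v →
            (d.insert (L.getD k 0) (k : Int)).get? v
              = (pvFirstFrom L k v).map (fun (j : Nat) => (j : Int)) := by
          intro v hv
          by_cases hvx : v = L.getD k 0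
          · rw [hvx, PySem.Dict.get?_insert_self, pvFirstFrom_step L k (L.getD k 0) hklt,
                if_pos (by rw [← hgetD])]
            rfl
          · rw [PySem.Dict.get?_insert_of_ne d _ hvx, hinv v hv,
                pvFirstFrom_step L k v hklt, if_neg (by rw [← hgetD]; exact fun h => hvx h.symm)]
        rw [hrange, ih (d.insert (L.getD k 0) (k : Int)) best (by omega) hinv2]
        unfold pvStep
        rw [hstep]
      · rw [if_neg hpos]
        have hinv' : ∀ v : Int, 0 < v →
            d.get? v = (pvFirstFrom L k v).map (fun (j : Nat) => (j : Int)) := by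
          intro v hv
          rw [hinv v hv, pvFirstFrom_step L k v hklt,
              if_neg (by rw [← hgetD]; omega)]
        rw [ih d best (by omega) hinv', hrange]
        unfold pvStep
        rw [hstep]

-- A's enumerate fold is the same forward fold of pvStep.
theorem pvA_fold_eq (L : List Int) (b : Int) :
    (PySem.List.enumerate L).foldl
      (fun min_dist (p : Int × Int) =>
        if p.2 < 0 then
          match pvFindNext L p.1 with
          | some to_next_dist =>
              if to_next_dist ≠ 0 then min to_next_dist min_dist else min_dist
          | none => min_dist
        else min_dist) b
      = (List.range L.length).foldl (pvStep L) b := by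
  rw [PySem.List.enumerate_eq_map_pyRange L 0, List.foldl_map,
      PySem.List.pyRange_one 0 (PySem.List.len L)]
  simp only [PySem.List.len_eq, Int.sub_zero, Int.toNat_natCast, List.foldl_map, Int.zero_add]
  apply PySem.List.foldl_congr_mem
  intro md i hi
  have hilt : i < L.length := List.mem_range.mp hi
  have hgd : PySem.List.pyGetD L (i : Int) 0 = L.getD i 0 := by
    simp [PySem.List.pyGetD_natCast]
  have hnext : pvFindNext L (i : Int)
      = (pvFirstFrom L (i + 1) (-(L.getD i 0))).map (fun (j' : Nat) => (j' : Int) - (i : Int)) := by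
    unfold pvFindNext
    have htn : ((i : Int) + 1).toNat = i + 1 := by omega
    rw [htn, pvFindNextGo_eq]
    congr 2
    simp [PySem.List.pyGet?_natCast, List.getD_eq_getElem?_getD]
  simp only [hgd, pvStep, pvOptDist]
  by_cases hneg : L.getD i 0 < 0
  · rw [if_pos hneg, if_pos hneg, hnext]
    cases hff : pvFirstFrom L (i + 1) (-(L.getD i 0)) with
    | none => rfl
    | some j' =>
      have hj' : i + 1 ≤ j' := pvFirstFrom_ge L (i + 1) _ j' hff
      simp only [Option.map_some]
      rw [if_pos (by omega)]
  · rw [if_neg hneg, if_neg hneg]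

-- when no index contributes, the fold keeps its accumulator
theorem pvFoldl_id (L : List Int) (l : List Nat) (b : Int)
    (h : ∀ i ∈ l, pvOptDist L i = none) : l.foldl (pvStep L) b = b := by
  induction l generalizing b with
  | nil => rfl
  | cons a l ih =>
    rw [List.foldl_cons]
    have : pvStep L b a = b := by unfold pvStep; rw [h a (List.mem_cons_self)]
    rw [this]
    exact ih b (fun i hi => h i (List.mem_cons_of_mem a hi))

theorem pvNoNeg (L : List Int) (h : 0 ≤ PySem.List.minD L (fun x => x) 0) (i : Nat) :
    pvOptDist L i = none := by
  have hx : ∀ x ∈ L, 0 ≤ x := by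
    intro x hx
    cases hm : PySem.List.min? L (fun x => x) with
    | none => exact absurd hx (by simp [(PySem.List.min?_eq_none_iff _ _).mp hm])
    | some m =>
      have := PySem.List.min?_isMin hm x hx
      have hmd : PySem.List.minD L (fun x => x) 0 = m := by
        unfold PySem.List.minD; rw [hm]; rfl
      rw [hmd] at h
      omega
  have : 0 ≤ L.getD i 0 := by
    by_cases hi : i < L.length
    · rw [List.getD_eq_getElem L 0 hi]
      exact hx _ (List.getElem_mem hi)
    · rw [List.getD_eq_default L 0 (by omega)]
  unfold pvOptDist
  rw [if_neg (by omega)]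

-- ===== VERDICT (by name: the statement is the Claim_ definition above) =====
theorem find_slippers_spec : Claim_equal_find_slippers := by
  intro L _
  unfold Spec_find_slippers find_slippers find_slippers_alt
  simp only [PySem.List.len_eq]
  rw [pvA_fold_eq L (L.length : Int)]
  by_cases hmin : 0 ≤ PySem.List.minD L (fun x => x) 0
  · rw [if_pos hmin, pvFoldl_id L _ _ (fun i _ => pvNoNeg L hmin i)]
    simp
  · rw [if_neg hmin,
        ← pvAltGo_eq L L.length PySem.Dict.empty (L.length : Int) le_rfl ?_]
    intro v _
    rw [pvFirstFrom_end L L.length v le_rfl, PySem.Dict.get?_empty]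
    rfl
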